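-- pv_equiv track=rewrite | github.com/hibeen1/PS- | 카카오대비/파과되지 않은 건물.py | solution
-- ===== SOURCE A (Python) =====
-- def solution(board, skill):
--     n = len(board)
--     m = len(board[0])
--     d = [[0]*1003 for _ in range(1003)]
--     # 변화량 테이블에 스킬 기록
--
--     # 4K
--     for v in skill:
--         kind, r1, c1, r2, c2, degree = v
--         if kind == 1: degree = -degree
--         d[r1][c1] += degree
--         d[r1][c2+1] -= degree
--         d[r2+1][c1] -= degree
--         d[r2+1][c2+1] += degree
--
--     # 누적합 처리
--     # N * M
--     for i in range(1, n):
--         for j in range(m):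
--             d[i][j] += d[i-1][j]
--
--     for i in range(n):
--         for j in range(1, m):
--             d[i][j] += d[i][j-1]
--
--     ans = 0
--     # N * M
--     for i in range(n):
--         for j in range(m):
--             if d[i][j] + board[i][j] > 0:
--                 ans += 1
--
--     return ans
-- ===== SOURCE B (Python) =====
-- def solution(board, skill):
--     n, m = len(board), len(board[0])
--     grid = [row[:] for row in board]
--     for kind, r1, c1, r2, c2, degree in skill:
--         delta = -degree if kind == 1 else degree
--         for r in range(r1, min(r2 + 1, n)):
--             for c in range(c1, min(c2 + 1, m)):
--                 grid[r][c] += delta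
--     return sum(1 for r in range(n) for c in range(m) if grid[r][c] > 0)
-- ===== Notes on version B (the rewrite author's own statement) =====
-- stated objective: simpler
-- what changed: Replaces A's fixed 1003x1003 difference table and its two cumulative-sum passes by a copied grid to which each skill rectangle (clipped to the board) is added directly, then counts cells > 0.
-- outside the precondition, e.g. on solution([[0], [6], [0]], [[2, 2, 0, 0, 0, 10]]): A returns 0, B returns 1; on solution([[1, 1], [1, 1]], [[1, -1, 0, 0, 0, 5]]): A returns 4, B returns 2
import Mathlib
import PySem

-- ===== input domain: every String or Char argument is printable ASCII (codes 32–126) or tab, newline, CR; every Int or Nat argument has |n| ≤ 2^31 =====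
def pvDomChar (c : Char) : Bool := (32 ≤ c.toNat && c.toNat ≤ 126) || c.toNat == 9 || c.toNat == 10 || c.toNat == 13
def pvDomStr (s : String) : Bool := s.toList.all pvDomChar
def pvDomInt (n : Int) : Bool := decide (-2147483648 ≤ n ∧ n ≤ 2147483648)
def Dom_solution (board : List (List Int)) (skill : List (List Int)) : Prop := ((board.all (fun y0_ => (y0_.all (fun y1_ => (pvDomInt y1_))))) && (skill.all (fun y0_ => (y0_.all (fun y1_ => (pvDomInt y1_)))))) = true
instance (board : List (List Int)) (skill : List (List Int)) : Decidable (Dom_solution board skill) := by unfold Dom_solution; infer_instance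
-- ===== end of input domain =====

-- B replaces A's fixed 1003×1003 difference table and its two cumulative-sum passes by direct
-- addition of each (board-clipped) skill rectangle on a copied grid, then counts cells > 0.
-- Neither implementation mutates its arguments.

-- ===== PORT A =====
-- shared grid accessors: read g[i][j] / update g[i][j] in place (exact for Python lists on
-- nonnegative in-range indices, which Pre_solution guarantees for every access the ports make)
def gget (g : List (List Int)) (i j : Nat) : Int := (g.getD i []).getD j 0
def gmod (g : List (List Int)) (i j : Nat) (f : Int → Int) : List (List Int) :=
  g.modify i (fun row => row.modify j f)

-- one iteration of A's skill loop (`kind, r1, c1, r2, c2, degree = v`; .toNat is exact because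
-- Pre_solution restricts coordinates to be nonnegative)
def stepA (d : List (List Int)) (v : List Int) : List (List Int) :=
  match v with
  | [kind, r1, c1, r2, c2, deg] =>
    let degree := if kind = 1 then -deg else deg
    let d := gmod d r1.toNat c1.toNat (· + degree)
    let d := gmod d r1.toNat (c2.toNat + 1) (· - degree)
    let d := gmod d (r2.toNat + 1) c1.toNat (· - degree)
    gmod d (r2.toNat + 1) (c2.toNat + 1) (· + degree)
  | _ => d

def solution (board : List (List Int)) (skill : List (List Int)) : Int :=
  let n := board.length
  let m := (board.getD 0 []).length   -- len(board[0]); board ≠ [] under Pre_solution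
  let d0 : List (List Int) := List.replicate 1003 (List.replicate 1003 0)
  let d1 := skill.foldl stepA d0
  let d2 := (List.range' 1 (n - 1)).foldl (fun d i =>
      (List.range m).foldl (fun d j => gmod d i j (· + gget d (i - 1) j)) d) d1
  let d3 := (List.range n).foldl (fun d i =>
      (List.range' 1 (m - 1)).foldl (fun d j => gmod d i j (· + gget d i (j - 1))) d) d2
  (List.range n).foldl (fun ans i =>
    (List.range m).foldl (fun ans j =>
      if gget d3 i j + gget board i j > 0 then ans + 1 else ans) ans) 0

-- ===== PORT B =====
-- one iteration of B's skill loop: add the signed degree over the rectangle clipped to the board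
-- (range(r1, min(r2 + 1, n)) × range(c1, min(c2 + 1, m)); .toNat exact as above)
def stepB (n m : Nat) (g : List (List Int)) (v : List Int) : List (List Int) :=
  match v with
  | [kind, r1, c1, r2, c2, deg] =>
    let delta := if kind = 1 then -deg else deg
    (List.range' r1.toNat (min (r2.toNat + 1) n - r1.toNat)).foldl (fun g r =>
      (List.range' c1.toNat (min (c2.toNat + 1) m - c1.toNat)).foldl (fun g c =>
        gmod g r c (· + delta)) g) g
  | _ => g

def solution_alt (board : List (List Int)) (skill : List (List Int)) : Int :=
  let n := board.length
  let m := (board.getD 0 []).length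
  let grid := skill.foldl (stepB n m) (board.map (fun row => row))  -- [row[:] for row in board]
  (List.range n).foldl (fun acc r =>
    (List.range m).foldl (fun acc c =>
      if gget grid r c > 0 then acc + 1 else acc) acc) 0

-- ===== PRECONDITION & SPEC =====
def PreRow (s : List Int) : Prop :=
  s.length = 6 ∧
  0 ≤ s.getD 1 0 ∧ s.getD 1 0 ≤ s.getD 3 0 ∧ s.getD 3 0 ≤ 1001 ∧
  0 ≤ s.getD 2 0 ∧ s.getD 2 0 ≤ s.getD 4 0 ∧ s.getD 4 0 ≤ 1001

-- Pre_solution keeps the problem's natural domain: a nonempty board that fits A's 1003×1003 table,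
-- rows at least as long as row 0 (A only reads the first len(board[0]) entries of each row), and
-- skills that are 6-tuples describing valid in-range rectangles (0 ≤ r1 ≤ r2 ≤ 1001,
-- 0 ≤ c1 ≤ c2 ≤ 1001).  It excludes inputs on which A raises (empty/oversized/too-short-row
-- boards, non-6-tuple skills, coordinates ≥ 1002) and, as a natural-domain restriction, skills
-- with negative (Python index-wraparound) or reversed (r1 > r2 / c1 > c2, unmatched corner deltas)
-- rectangle coordinates, on which A still returns but its value is an accident of the table.
def Pre_solution (board : List (List Int)) (skill : List (List Int)) : Prop :=
  board ≠ [] ∧ board.length ≤ 1003 ∧ (board.getD 0 []).length ≤ 1003 ∧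
  (∀ row ∈ board, (board.getD 0 []).length ≤ row.length) ∧
  (∀ s ∈ skill, PreRow s)
instance (board : List (List Int)) (skill : List (List Int)) : Decidable (Pre_solution board skill) := by
  unfold Pre_solution PreRow; infer_instance

def pvWitness_solution : List (List Int) × List (List Int) :=
  ([[1, 0], [0, 2]], [[1, 0, 0, 1, 1, 2], [2, 1, 0, 1, 0, 3]])

def Spec_solution (board : List (List Int)) (skill : List (List Int)) (out : Int) : Prop := out = solution_alt board skill
instance (board : List (List Int)) (skill : List (List Int)) (out : Int) : Decidable (Spec_solution board skill out) := by unfold Spec_solution; infer_instance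

-- ===== CLAIM (what is proved, stated in full; the proofs are below) =====
def Claim_equal_solution : Prop := ∀ (board : List (List Int)) (skill : List (List Int)), Dom_solution board skill → Pre_solution board skill → Spec_solution board skill (solution board skill)

-- ===== LEMMAS AND PROOFS =====

theorem length_gmod (g : List (List Int)) (r c : Nat) (f : Int → Int) :
    (gmod g r c f).length = g.length := by
  simp [gmod]

theorem getD_eq (l : List (List Int)) (i : Nat) : l.getD i [] = (l[i]?).getD [] := by
  simp [List.getD]

theorem row_gmod (g : List (List Int)) (r c i : Nat) (f : Int → Int) :
    ((gmod g r c f).getD i []).length = (g.getD i []).length := by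
  rw [getD_eq, getD_eq, gmod, List.getElem?_modify]
  by_cases h : r = i <;> simp [h] <;> cases g[i]? <;> simp

theorem getD_row (l : List Int) (j : Nat) : l.getD j 0 = (l[j]?).getD 0 := by
  simp [List.getD]

theorem gget_gmod (g : List (List Int)) (r c : Nat) (f : Int → Int)
    (hr : r < g.length) (hc : c < (g.getD r []).length) (i j : Nat) :
    gget (gmod g r c f) i j = if i = r ∧ j = c then f (gget g i j) else gget g i j := by
  unfold gget
  rw [getD_eq, getD_eq, gmod, List.getElem?_modify]
  by_cases h : i = r
  · subst h
    have hs : g[i]? = some (g.getD i []) := by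
      rw [List.getElem?_eq_getElem hr, getD_eq, List.getElem?_eq_getElem hr]
      rfl
    rw [hs]
    have hmap : ((fun a => if i = i then a.modify c f else a) <$> some (g.getD i [])).getD []
        = (g.getD i []).modify c f := by simp
    rw [hmap]
    simp only [eq_self_iff_true, true_and, Option.getD_some]
    rw [getD_row, getD_row, List.getElem?_modify]
    by_cases hj : j = c
    · subst hj
      have hs2 : (g.getD i [])[j]? = some ((g.getD i []).getD j 0) := by
        rw [List.getElem?_eq_getElem hc, List.getD_eq_getElem _ _ hc]
      rw [hs2]; simp
    · simp [Ne.symm hj, hj]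
  · simp [h, Ne.symm h]

def effCorner (s : List Int) (i j : Nat) : Int :=
  match s with
  | [kind, r1, c1, r2, c2, deg] =>
    let v := if kind = 1 then -deg else deg
    v * ((if i = r1.toNat then 1 else 0) - (if i = r2.toNat + 1 then 1 else 0))
      * ((if j = c1.toNat then 1 else 0) - (if j = c2.toNat + 1 then 1 else 0))
  | _ => 0

def Shaped (g : List (List Int)) : Prop :=
  g.length = 1003 ∧ ∀ i < 1003, (g.getD i []).length = 1003

theorem shaped_gmod (g : List (List Int)) (r c : Nat) (f : Int → Int) (h : Shaped g) :
    Shaped (gmod g r c f) := by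
  obtain ⟨h1, h2⟩ := h
  exact ⟨by rw [length_gmod, h1], fun i hi => by rw [row_gmod]; exact h2 i hi⟩

theorem gget_gmod' (g : List (List Int)) (r c : Nat) (f : Int → Int)
    (hs : Shaped g) (hr : r < 1003) (hc : c < 1003) (i j : Nat) :
    gget (gmod g r c f) i j = if i = r ∧ j = c then f (gget g i j) else gget g i j := by
  exact gget_gmod g r c f (hs.1 ▸ hr) (by rw [hs.2 r hr]; exact hc) i j

theorem stepA_char (g : List (List Int)) (k r1 c1 r2 c2 dg : Int)
    (h1 : 0 ≤ r1) (h2 : r1 ≤ r2) (h3 : r2 ≤ 1001) (h4 : 0 ≤ c1) (h5 : c1 ≤ c2) (h6 : c2 ≤ 1001)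
    (hs : Shaped g) (i j : Nat) :
    gget (stepA g [k, r1, c1, r2, c2, dg]) i j
      = gget g i j + effCorner [k, r1, c1, r2, c2, dg] i j := by
  have b1 : r1.toNat < 1003 := by omega
  have b2 : r2.toNat + 1 < 1003 := by omega
  have b3 : c1.toNat < 1003 := by omega
  have b4 : c2.toNat + 1 < 1003 := by omega
  have hab : r1.toNat < r2.toNat + 1 := by omega
  have hcd : c1.toNat < c2.toNat + 1 := by omega
  have s1 := shaped_gmod g r1.toNat c1.toNat (· + (if k = 1 then -dg else dg)) hs
  have s2 := shaped_gmod _ r1.toNat (c2.toNat + 1) (· - (if k = 1 then -dg else dg)) s1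
  have s3 := shaped_gmod _ (r2.toNat + 1) c1.toNat (· - (if k = 1 then -dg else dg)) s2
  unfold stepA effCorner
  simp only
  rw [gget_gmod' _ _ _ _ s3 b2 b4, gget_gmod' _ _ _ _ s2 b2 b3,
      gget_gmod' _ _ _ _ s1 b1 b4, gget_gmod' _ _ _ _ hs b1 b3]
  by_cases hi1 : i = r1.toNat <;> by_cases hi2 : i = r2.toNat + 1 <;>
    by_cases hj1 : j = c1.toNat <;> by_cases hj2 : j = c2.toNat + 1 <;>
    simp_all <;> ring

theorem six_of_len (s : List Int) (h : s.length = 6) :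
    ∃ a b c d e f, s = [a, b, c, d, e, f] := by
  rcases s with _ | ⟨a, _ | ⟨b, _ | ⟨c, _ | ⟨d, _ | ⟨e, _ | ⟨f, _ | ⟨g, t⟩⟩⟩⟩⟩⟩⟩ <;>
    simp_all

theorem shaped_stepA (g : List (List Int)) (s : List Int) (hp : PreRow s) (hs : Shaped g) :
    Shaped (stepA g s) := by
  obtain ⟨a, b, c, d, e, f, rfl⟩ := six_of_len s hp.1
  unfold stepA
  exact shaped_gmod _ _ _ _ (shaped_gmod _ _ _ _ (shaped_gmod _ _ _ _ (shaped_gmod _ _ _ _ hs)))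

theorem foldA_shaped (skill : List (List Int)) (g : List (List Int)) (hs : Shaped g)
    (hp : ∀ s ∈ skill, PreRow s) : Shaped (skill.foldl stepA g) := by
  induction skill generalizing g with
  | nil => exact hs
  | cons s t ih =>
    exact ih (stepA g s) (shaped_stepA g s (hp s (by simp)) hs) (fun x hx => hp x (by simp [hx]))

theorem foldA_gget (skill : List (List Int)) (g : List (List Int)) (hs : Shaped g)
    (hp : ∀ s ∈ skill, PreRow s) (i j : Nat) :
    gget (skill.foldl stepA g) i j = gget g i j + (skill.map (effCorner · i j)).sum := by
  induction skill generalizing g with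
  | nil => simp
  | cons s t ih =>
    have hps := hp s (by simp)
    obtain ⟨a, b, c, d, e, f, rfl⟩ := six_of_len s hps.1
    obtain ⟨-, q1, q2, q3, q4, q5, q6⟩ := hps
    simp only [List.getD] at q1 q2 q3 q4 q5 q6
    simp only [List.foldl_cons, List.map_cons, List.sum_cons]
    rw [ih (stepA g _) (shaped_stepA g _ (hp _ (by simp)) hs) (fun x hx => hp x (by simp [hx]))]
    rw [stepA_char g a b c d e f (by simp_all) (by simp_all) (by simp_all) (by simp_all) (by simp_all) (by simp_all) hs i j]
    ring

theorem vinner (g : List (List Int)) (hs : Shaped g) (i : Nat) (hi1 : 1 ≤ i) (hi : i < 1003)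
    (t : Nat) (ht : t ≤ 1003) :
    Shaped ((List.range t).foldl (fun d j => gmod d i j (· + gget d (i - 1) j)) g) ∧
    ∀ p q, gget ((List.range t).foldl (fun d j => gmod d i j (· + gget d (i - 1) j)) g) p q
      = if p = i ∧ q < t then gget g p q + gget g (i - 1) q else gget g p q := by
  induction t with
  | zero => exact ⟨hs, fun p q => by simp⟩
  | succ t ih =>
    obtain ⟨sh, hch⟩ := ih (by omega)
    rw [List.range_succ, List.foldl_append, List.foldl_cons, List.foldl_nil]
    refine ⟨shaped_gmod _ _ _ _ sh, fun p q => ?_⟩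
    rw [gget_gmod' _ _ _ _ sh hi (by omega) p q]
    rw [hch (i-1) t, hch p q]
    by_cases hp : p = i <;> by_cases hq : q = t <;> by_cases hq2 : q < t <;>
      simp_all <;> first | omega | (exfalso; omega)

theorem vouter (g : List (List Int)) (hs : Shaped g) (m n : Nat) (hm : m ≤ 1003) (hn : n ≤ 1003)
    (k : Nat) (hk : k ≤ n - 1) :
    Shaped ((List.range' 1 k).foldl (fun d i =>
        (List.range m).foldl (fun d j => gmod d i j (· + gget d (i - 1) j)) d) g) ∧
    ∀ p q, gget ((List.range' 1 k).foldl (fun d i =>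
        (List.range m).foldl (fun d j => gmod d i j (· + gget d (i - 1) j)) d) g) p q
      = if 1 ≤ p ∧ p ≤ k ∧ q < m then ∑ r ∈ Finset.range (p + 1), gget g r q else gget g p q := by
  induction k with
  | zero => exact ⟨hs, fun p q => by rw [List.range'_zero, List.foldl_nil, if_neg (by omega)]⟩
  | succ k ih =>
    obtain ⟨sh, hch⟩ := ih (by omega)
    rw [List.range'_concat, one_mul, List.foldl_append, List.foldl_cons, List.foldl_nil]
    obtain ⟨sh2, hch2⟩ := vinner _ sh (1 + k) (by omega) (by omega) m hm
    refine ⟨sh2, fun p q => ?_⟩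
    rw [hch2 p q]
    by_cases hq : q < m
    · by_cases hp : p = 1 + k
      · subst hp
        rw [if_pos ⟨rfl, hq⟩, hch (1 + k) q, hch (1 + k - 1) q]
        have h1 : ¬ (1 ≤ 1 + k ∧ 1 + k ≤ k ∧ q < m) := by omega
        rw [if_neg h1]
        by_cases hk0 : k = 0
        · subst hk0
          norm_num [Finset.sum_range_succ]
          omega
        · have h2 : (1 ≤ 1 + k - 1 ∧ 1 + k - 1 ≤ k ∧ q < m) := by omega
          rw [if_pos h2]
          have : 1 + k - 1 = k := by omega
          rw [this]
          rw [if_pos (by omega : 1 ≤ 1 + k ∧ 1 + k ≤ k + 1 ∧ q < m)]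
          conv_rhs => rw [Finset.sum_range_succ, show 1 + k = k + 1 from by omega,
            Finset.sum_range_succ]
          rw [show 1 + k = k + 1 from by omega, Finset.sum_range_succ]
          ring
      · rw [if_neg (by omega : ¬ (p = 1 + k ∧ q < m)), hch p q]
        by_cases hple : 1 ≤ p ∧ p ≤ k
        · rw [if_pos ⟨hple.1, hple.2, hq⟩, if_pos (by omega : 1 ≤ p ∧ p ≤ k + 1 ∧ q < m)]
        · rw [if_neg (by omega), if_neg (by omega)]
    · rw [if_neg (by omega : ¬ (p = 1 + k ∧ q < m)), hch p q,
        if_neg (by omega), if_neg (by omega)]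

theorem hinner (g : List (List Int)) (hs : Shaped g) (i : Nat) (hi : i < 1003)
    (t : Nat) (ht : t ≤ 1002) :
    Shaped ((List.range' 1 t).foldl (fun d j => gmod d i j (· + gget d i (j - 1))) g) ∧
    ∀ p q, gget ((List.range' 1 t).foldl (fun d j => gmod d i j (· + gget d i (j - 1))) g) p q
      = if p = i ∧ 1 ≤ q ∧ q ≤ t then ∑ c ∈ Finset.range (q + 1), gget g i c else gget g p q := by
  induction t with
  | zero => exact ⟨hs, fun p q => by rw [List.range'_zero, List.foldl_nil, if_neg (by omega)]⟩
  | succ t ih =>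
    obtain ⟨sh, hch⟩ := ih (by omega)
    rw [List.range'_concat, one_mul, List.foldl_append, List.foldl_cons, List.foldl_nil]
    refine ⟨shaped_gmod _ _ _ _ sh, fun p q => ?_⟩
    rw [gget_gmod' _ _ _ _ sh hi (by omega) p q]
    by_cases hp : p = i ∧ q = 1 + t
    · obtain ⟨hp1, hp2⟩ := hp
      subst hp1; subst hp2
      rw [if_pos ⟨rfl, rfl⟩, if_pos ⟨rfl, by omega, by omega⟩]
      rw [show 1 + t - 1 = t from by omega, hch p t, hch p (1 + t)]
      rw [if_neg (by omega)]
      by_cases ht0 : t = 0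
      · subst ht0
        norm_num [Finset.sum_range_succ]
        omega
      · rw [if_pos ⟨rfl, by omega, by omega⟩]
        rw [show (1 : ℕ) + t = t + 1 from by omega,
          Finset.sum_range_succ (fun c => gget g p c) (t + 1)]
        ring
    · rw [if_neg hp, hch p q]
      by_cases hin : p = i ∧ 1 ≤ q ∧ q ≤ t
      · rw [if_pos hin, if_pos ⟨hin.1, hin.2.1, by omega⟩]
      · rw [if_neg hin, if_neg (by omega)]

theorem houter (g : List (List Int)) (hs : Shaped g) (m n : Nat) (hm : m ≤ 1003) (hn : n ≤ 1003)
    (k : Nat) (hk : k ≤ n) :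
    Shaped ((List.range k).foldl (fun d i =>
        (List.range' 1 (m - 1)).foldl (fun d j => gmod d i j (· + gget d i (j - 1))) d) g) ∧
    ∀ p q, gget ((List.range k).foldl (fun d i =>
        (List.range' 1 (m - 1)).foldl (fun d j => gmod d i j (· + gget d i (j - 1))) d) g) p q
      = if p < k ∧ 1 ≤ q ∧ q ≤ m - 1 then ∑ c ∈ Finset.range (q + 1), gget g p c else gget g p q := by
  induction k with
  | zero => exact ⟨hs, fun p q => by rw [List.range_zero, List.foldl_nil, if_neg (by omega)]⟩
  | succ k ih =>
    obtain ⟨sh, hch⟩ := ih (by omega)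
    rw [List.range_succ, List.foldl_append, List.foldl_cons, List.foldl_nil]
    obtain ⟨sh2, hch2⟩ := hinner _ sh k (by omega) (m - 1) (by omega)
    refine ⟨sh2, fun p q => ?_⟩
    rw [hch2 p q]
    by_cases hp : p = k ∧ 1 ≤ q ∧ q ≤ m - 1
    · obtain ⟨hp1, hp2, hp3⟩ := hp
      subst hp1
      rw [if_pos ⟨rfl, hp2, hp3⟩, if_pos ⟨by omega, hp2, hp3⟩]
      apply Finset.sum_congr rfl
      intro c hc
      rw [hch p c, if_neg (by omega)]
    · rw [if_neg hp, hch p q]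
      by_cases hin : p < k ∧ 1 ≤ q ∧ q ≤ m - 1
      · rw [if_pos hin, if_pos ⟨by omega, hin.2⟩]
      · rw [if_neg hin, if_neg (by omega)]

def effOne (s : List Int) (i j : Nat) : Int :=
  match s with
  | [kind, r1, c1, r2, c2, deg] =>
    let v := if kind = 1 then -deg else deg
    if r1.toNat ≤ i ∧ i ≤ r2.toNat ∧ c1.toNat ≤ j ∧ j ≤ c2.toNat then v else 0
  | _ => 0

theorem shaped_d0 : Shaped (List.replicate 1003 (List.replicate 1003 (0:Int))) := by
  refine ⟨List.length_replicate, fun i hi => ?_⟩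
  rw [List.getD_eq_getElem?_getD, List.getElem?_replicate, if_pos hi, Option.getD_some,
    List.length_replicate]

theorem getD_replicate' {α : Type} (n : Nat) (a dflt : α) (i : Nat) :
    (List.replicate n a).getD i dflt = if i < n then a else dflt := by
  rw [List.getD_eq_getElem?_getD, List.getElem?_replicate]
  by_cases hi : i < n
  · rw [if_pos hi, if_pos hi, Option.getD_some]
  · rw [if_neg hi, if_neg hi, Option.getD_none]

theorem gget_d0 (i j : Nat) : gget (List.replicate 1003 (List.replicate 1003 (0:Int))) i j = 0 := by
  unfold gget
  rw [getD_replicate']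
  by_cases hi : i < 1003
  · rw [if_pos hi, getD_replicate']
    by_cases hj : j < 1003
    · rw [if_pos hj]
    · rw [if_neg hj]
  · rw [if_neg hi]
    rfl

theorem ind_sum (x k : Nat) :
    (∑ r ∈ Finset.range k, if r = x then (1:Int) else 0) = if x < k then 1 else 0 := by
  rw [Finset.sum_ite_eq' (Finset.range k) x (fun _ => (1:Int))]
  simp

theorem corner_sum (a b c d e f : Int)
    (h1 : 0 ≤ b) (h2 : b ≤ d) (h4 : 0 ≤ c) (h5 : c ≤ e) (i j : Nat) :
    ∑ cc ∈ Finset.range (j + 1), ∑ r ∈ Finset.range (i + 1), effCorner [a, b, c, d, e, f] r cc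
      = effOne [a, b, c, d, e, f] i j := by
  unfold effCorner effOne
  simp only
  have hrow : ∀ cc, ∑ r ∈ Finset.range (i + 1),
      (if a = 1 then -f else f) * ((if r = b.toNat then (1:Int) else 0) - (if r = d.toNat + 1 then 1 else 0))
        * ((if cc = c.toNat then (1:Int) else 0) - (if cc = e.toNat + 1 then 1 else 0))
      = (if a = 1 then -f else f)
        * ((if b.toNat < i + 1 then (1:Int) else 0) - (if d.toNat + 1 < i + 1 then 1 else 0))
        * ((if cc = c.toNat then (1:Int) else 0) - (if cc = e.toNat + 1 then 1 else 0)) := by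
    intro cc
    rw [← Finset.sum_mul, ← Finset.mul_sum, Finset.sum_sub_distrib, ind_sum, ind_sum]
  rw [Finset.sum_congr rfl (fun cc _ => hrow cc)]
  rw [← Finset.mul_sum, Finset.sum_sub_distrib, ind_sum, ind_sum]
  have hbd : b.toNat ≤ d.toNat := by omega
  have hce : c.toNat ≤ e.toNat := by omega
  split_ifs <;> (try (exfalso; omega)) <;> ring

theorem eff_total (skill : List (List Int)) (hp : ∀ s ∈ skill, PreRow s) (i j : Nat) :
    ∑ cc ∈ Finset.range (j + 1), ∑ r ∈ Finset.range (i + 1),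
        (skill.map (effCorner · r cc)).sum
      = (skill.map (effOne · i j)).sum := by
  induction skill with
  | nil => simp
  | cons s t ih =>
    have hps := hp s (by simp)
    obtain ⟨a, b, c, d, e, f, rfl⟩ := six_of_len s hps.1
    obtain ⟨-, q1, q2, q3, q4, q5, q6⟩ := hps
    simp only [List.getD] at q1 q2 q3 q4 q5 q6
    simp only [List.map_cons, List.sum_cons]
    have hsplit : ∀ cc, ∑ r ∈ Finset.range (i + 1),
        (effCorner [a, b, c, d, e, f] r cc + (t.map (effCorner · r cc)).sum)
        = (∑ r ∈ Finset.range (i + 1), effCorner [a, b, c, d, e, f] r cc)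
          + ∑ r ∈ Finset.range (i + 1), (t.map (effCorner · r cc)).sum :=
      fun cc => Finset.sum_add_distrib
    rw [Finset.sum_congr rfl (fun cc _ => hsplit cc), Finset.sum_add_distrib,
      ih (fun x hx => hp x (by simp [hx])),
      corner_sum a b c d e f (by simp_all) (by simp_all) (by simp_all) (by simp_all) i j]

def ShapeB (g h : List (List Int)) : Prop :=
  g.length = h.length ∧ ∀ i, (g.getD i []).length = (h.getD i []).length

theorem shapeB_refl (g : List (List Int)) : ShapeB g g := ⟨rfl, fun _ => rfl⟩

theorem shapeB_gmod (g h : List (List Int)) (r c : Nat) (f : Int → Int) (hb : ShapeB g h) :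
    ShapeB (gmod g r c f) h :=
  ⟨by rw [length_gmod, hb.1], fun i => by rw [row_gmod, hb.2 i]⟩

theorem cinner (bd g : List (List Int)) (hb : ShapeB g bd) (r : Nat) (hr : r < bd.length)
    (c0 L : Nat) (hc : 0 < L → c0 + L ≤ (bd.getD r []).length) (delta : Int) :
    ShapeB ((List.range' c0 L).foldl (fun g c => gmod g r c (· + delta)) g) bd ∧
    ∀ p q, gget ((List.range' c0 L).foldl (fun g c => gmod g r c (· + delta)) g) p q
      = if p = r ∧ c0 ≤ q ∧ q < c0 + L then gget g p q + delta else gget g p q := by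
  induction L with
  | zero => exact ⟨hb, fun p q => by rw [List.range'_zero, List.foldl_nil, if_neg (by omega)]⟩
  | succ L ih =>
    have hc' := hc (by omega)
    obtain ⟨sh, hch⟩ := ih (fun _ => by omega)
    rw [List.range'_concat, one_mul, List.foldl_append, List.foldl_cons, List.foldl_nil]
    refine ⟨shapeB_gmod _ _ _ _ _ sh, fun p q => ?_⟩
    rw [gget_gmod _ _ _ _ (by rw [sh.1]; exact hr) (by rw [sh.2 r]; omega) p q, hch p q]
    by_cases hp : p = r ∧ q = c0 + L
    · rw [if_pos ⟨hp.1, hp.2⟩, if_neg (by omega), if_pos (by omega)]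
    · by_cases hin : p = r ∧ c0 ≤ q ∧ q < c0 + L
      · rw [if_neg hp, if_pos hin, if_pos (by omega)]
      · rw [if_neg hp, if_neg hin, if_neg (by omega)]

theorem rinner (bd g : List (List Int)) (hb : ShapeB g bd) (r0 K : Nat)
    (hrk : 0 < K → r0 + K ≤ bd.length) (c0 L : Nat)
    (hc : ∀ i < bd.length, 0 < L → c0 + L ≤ (bd.getD i []).length) (delta : Int) :
    ShapeB ((List.range' r0 K).foldl (fun g r =>
        (List.range' c0 L).foldl (fun g c => gmod g r c (· + delta)) g) g) bd ∧
    ∀ p q, gget ((List.range' r0 K).foldl (fun g r =>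
        (List.range' c0 L).foldl (fun g c => gmod g r c (· + delta)) g) g) p q
      = if r0 ≤ p ∧ p < r0 + K ∧ c0 ≤ q ∧ q < c0 + L then gget g p q + delta else gget g p q := by
  induction K with
  | zero => exact ⟨hb, fun p q => by rw [List.range'_zero, List.foldl_nil, if_neg (by omega)]⟩
  | succ K ih =>
    have hrk' := hrk (by omega)
    obtain ⟨sh, hch⟩ := ih (fun _ => by omega)
    rw [List.range'_concat, one_mul, List.foldl_append, List.foldl_cons, List.foldl_nil]
    obtain ⟨sh2, hch2⟩ := cinner bd _ sh (r0 + K) (by omega) c0 L (hc _ (by omega)) delta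
    refine ⟨sh2, fun p q => ?_⟩
    rw [hch2 p q]
    by_cases hp : p = r0 + K ∧ c0 ≤ q ∧ q < c0 + L
    · rw [if_pos hp, hch p q, if_neg (by omega), if_pos (by omega)]
    · rw [if_neg hp, hch p q]
      by_cases hin : r0 ≤ p ∧ p < r0 + K ∧ c0 ≤ q ∧ q < c0 + L
      · rw [if_pos hin, if_pos (by omega)]
      · rw [if_neg hin, if_neg (by omega)]

def clipOne (n m : Nat) (s : List Int) (i j : Nat) : Int :=
  match s with
  | [kind, r1, c1, r2, c2, deg] =>
    let v := if kind = 1 then -deg else deg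
    if r1.toNat ≤ i ∧ i < min (r2.toNat + 1) n ∧ c1.toNat ≤ j ∧ j < min (c2.toNat + 1) m
      then v else 0
  | _ => 0

theorem stepB_char (bd g : List (List Int)) (hb : ShapeB g bd) (n m : Nat)
    (hn : n ≤ bd.length) (hm : ∀ i < bd.length, m ≤ (bd.getD i []).length)
    (s : List Int) (hps : PreRow s) :
    ShapeB (stepB n m g s) bd ∧
    ∀ p q, gget (stepB n m g s) p q = gget g p q + clipOne n m s p q := by
  obtain ⟨a, b, c, d, e, f, rfl⟩ := six_of_len s hps.1
  obtain ⟨-, q1, q2, q3, q4, q5, q6⟩ := hps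
  simp only [List.getD] at q1 q2 q3 q4 q5 q6
  unfold stepB clipOne
  simp only
  obtain ⟨sh, hch⟩ := rinner bd g hb b.toNat (min (d.toNat + 1) n - b.toNat)
    (fun h0 => by omega)
    c.toNat (min (e.toNat + 1) m - c.toNat)
    (fun i hi h0 => by have := hm i hi; omega) (if a = 1 then -f else f)
  refine ⟨sh, fun p q => ?_⟩
  rw [hch p q]
  by_cases hin : b.toNat ≤ p ∧ p < min (d.toNat + 1) n ∧ c.toNat ≤ q ∧ q < min (e.toNat + 1) m
  · rw [if_pos (by omega), if_pos hin]
  · rw [if_neg (by omega), if_neg hin]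
    ring

theorem foldB (bd : List (List Int)) (skill : List (List Int)) (g : List (List Int))
    (hb : ShapeB g bd) (n m : Nat) (hn : n ≤ bd.length)
    (hm : ∀ i < bd.length, m ≤ (bd.getD i []).length)
    (hp : ∀ s ∈ skill, PreRow s) (p q : Nat) :
    gget (skill.foldl (stepB n m) g) p q
      = gget g p q + (skill.map (clipOne n m · p q)).sum := by
  induction skill generalizing g with
  | nil => simp
  | cons s t ih =>
    obtain ⟨sh, hch⟩ := stepB_char bd g hb n m hn hm s (hp s (by simp))
    simp only [List.foldl_cons, List.map_cons, List.sum_cons]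
    rw [ih (stepB n m g s) sh (fun x hx => hp x (by simp [hx])), hch p q]
    ring

theorem clip_eq_eff (n m : Nat) (s : List Int) (hps : PreRow s) (p q : Nat)
    (hpn : p < n) (hqm : q < m) : clipOne n m s p q = effOne s p q := by
  obtain ⟨a, b, c, d, e, f, rfl⟩ := six_of_len s hps.1
  unfold clipOne effOne
  simp only
  by_cases hin : b.toNat ≤ p ∧ p ≤ d.toNat ∧ c.toNat ≤ q ∧ q ≤ e.toNat
  · rw [if_pos (by omega), if_pos hin]
  · rw [if_neg (by omega), if_neg hin]

theorem count_eq (n m : Nat) (P Q : Nat → Nat → Prop)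
    [hP : ∀ i j, Decidable (P i j)] [hQ : ∀ i j, Decidable (Q i j)]
    (h : ∀ i, i < n → ∀ j, j < m → (P i j ↔ Q i j)) (a : Int) :
    (List.range n).foldl (fun ans i =>
        (List.range m).foldl (fun ans j => if P i j then ans + 1 else ans) ans) a
      = (List.range n).foldl (fun ans i =>
        (List.range m).foldl (fun ans j => if Q i j then ans + 1 else ans) ans) a := by
  induction n generalizing a with
  | zero => rfl
  | succ n ih =>
    rw [List.range_succ, List.foldl_append, List.foldl_append,
      List.foldl_cons, List.foldl_cons, List.foldl_nil, List.foldl_nil]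
    rw [ih (fun i hi j hj => h i (by omega) j hj)]
    have hrow : ∀ (b : Int) (t : Nat), t ≤ m →
        (List.range t).foldl (fun ans j => if P n j then ans + 1 else ans) b
          = (List.range t).foldl (fun ans j => if Q n j then ans + 1 else ans) b := by
      intro b t ht
      induction t generalizing b with
      | zero => rfl
      | succ t iht =>
        rw [List.range_succ, List.foldl_append, List.foldl_append,
          List.foldl_cons, List.foldl_cons, List.foldl_nil, List.foldl_nil]
        rw [iht b (by omega)]
        by_cases hpq : P n t
        · rw [if_pos hpq, if_pos ((h n (by omega) t (by omega)).mp hpq)]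
        · rw [if_neg hpq, if_neg (fun hq => hpq ((h n (by omega) t (by omega)).mpr hq))]
    exact hrow _ m le_rfl

-- ===== VERDICT (by name: the statement is the Claim_ definition above) =====
theorem board_row_len (board : List (List Int)) 
    (hrows : ∀ row ∈ board, (board.getD 0 []).length ≤ row.length)
    (i : Nat) (hi : i < board.length) :
    (board.getD 0 []).length ≤ (board.getD i []).length := by
  apply hrows
  rw [List.getD_eq_getElem?_getD, List.getElem?_eq_getElem hi]
  exact List.getElem_mem hi

theorem solution_spec : Claim_equal_solution := by
  intro board skill _ hpre
  unfold Spec_solution solution solution_alt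
  dsimp only
  obtain ⟨hne, hn1003, hm1003, hrows, hsk⟩ := hpre
  have hmap : board.map (fun row => row) = board := List.map_id' board
  rw [hmap]
  have hn1 : 1 ≤ board.length := by
    cases board with
    | nil => exact absurd rfl hne
    | cons a t => simp
  -- characterize A's table after all three phases, and B's grid
  have sh1 := foldA_shaped skill _ shaped_d0 hsk
  have hg1 : ∀ r c, gget (skill.foldl stepA (List.replicate 1003 (List.replicate 1003 0))) r c
      = (skill.map (effCorner · r c)).sum := by
    intro r c
    rw [foldA_gget skill _ shaped_d0 hsk r c, gget_d0, zero_add]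
  obtain ⟨sh2, hch2⟩ := vouter _ sh1 (board.getD 0 []).length board.length hm1003 hn1003
    (board.length - 1) le_rfl
  obtain ⟨sh3, hch3⟩ := houter _ sh2 (board.getD 0 []).length board.length hm1003 hn1003
    board.length le_rfl
  apply count_eq
  intro i hi j hj
  -- A side: value of d3 at (i, j)
  have e2 : ∀ cc, cc < (board.getD 0 []).length →
      gget ((List.range' 1 (board.length - 1)).foldl (fun d i =>
        (List.range (board.getD 0 []).length).foldl
          (fun d j => gmod d i j (· + gget d (i - 1) j)) d)
        (skill.foldl stepA (List.replicate 1003 (List.replicate 1003 0)))) i cc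
      = ∑ r ∈ Finset.range (i + 1), (skill.map (effCorner · r cc)).sum := by
    intro cc hcc
    rw [hch2 i cc]
    by_cases hi0 : i = 0
    · subst hi0
      rw [if_neg (by omega), Finset.sum_range_one, hg1]
    · rw [if_pos ⟨by omega, by omega, hcc⟩]
      exact Finset.sum_congr rfl (fun r _ => hg1 r cc)
  have e3 : gget ((List.range board.length).foldl (fun d i =>
        (List.range' 1 ((board.getD 0 []).length - 1)).foldl
          (fun d j => gmod d i j (· + gget d i (j - 1))) d)
        ((List.range' 1 (board.length - 1)).foldl (fun d i =>
          (List.range (board.getD 0 []).length).foldl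
            (fun d j => gmod d i j (· + gget d (i - 1) j)) d)
          (skill.foldl stepA (List.replicate 1003 (List.replicate 1003 0))))) i j
      = (skill.map (effOne · i j)).sum := by
    rw [hch3 i j]
    by_cases hj0 : j = 0
    · subst hj0
      rw [if_neg (by omega), e2 0 hj, ← eff_total skill hsk i 0, Finset.sum_range_one]
    · rw [if_pos ⟨hi, by omega, by omega⟩, ← eff_total skill hsk i j]
      exact Finset.sum_congr rfl (fun cc hcc =>
        e2 cc (by have := Finset.mem_range.mp hcc; omega))
  -- B side: value of the grid at (i, j)
  have eB : gget (skill.foldl (stepB board.length (board.getD 0 []).length) board) i j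
      = gget board i j + (skill.map (effOne · i j)).sum := by
    rw [foldB board skill board (shapeB_refl board) _ _ le_rfl
      (fun r hr => board_row_len board hrows r hr) hsk i j,
      List.map_congr_left (fun s hs => clip_eq_eff _ _ s (hsk s hs) i j hi hj)]
  rw [e3, eB]
  omega
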